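-- pv_equiv track=rewrite | github.com/codybartfast/aoc-2017-py | day21.py | normaliser
-- ===== SOURCE A (Python) =====
-- def to_str(grid):
--     return "/".join("".join(row) for row in grid)
--
-- def normaliser(dict):
--     normalise = {}
--     for pattern in list(dict.keys()):
--         grid = list(map(list, pattern.split("/")))
--         for _ in range(4):
--             for row in grid:
--                 row.reverse()
--             normalise[to_str(grid)] = pattern
--             grid = list(map(list, zip(*grid)))
--             normalise[to_str(grid)] = pattern
--
--     return normalise
-- ===== SOURCE B (Python) =====
-- def normaliser(dict):
--     normalise = {}
--     for pattern in dict: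
--         for k in range(1, 9):
--             s = pattern
--             for op in "mtmtmtmt"[:k]:
--                 if op == "m":
--                     s = "/".join(seg[::-1] for seg in s.split("/"))
--                 else:
--                     s = "/".join(map("".join, zip(*s.split("/"))))
--             normalise[s] = pattern
--     return normalise
-- ===== Notes on version B (the rewrite author's own statement) =====
-- stated objective: alternative
-- what changed: A mutates one nested-list grid in place, alternating in-place row reversal with zip-transpose and recording after every half-step; B builds no nested lists and keeps no running grid: it derives each of the eight orientations independently from the original pattern string by folding the explicit op-word 'mtmtmtmt'[:k] with two pure string rewrites (segment reversal, column read-off).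
import Mathlib
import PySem

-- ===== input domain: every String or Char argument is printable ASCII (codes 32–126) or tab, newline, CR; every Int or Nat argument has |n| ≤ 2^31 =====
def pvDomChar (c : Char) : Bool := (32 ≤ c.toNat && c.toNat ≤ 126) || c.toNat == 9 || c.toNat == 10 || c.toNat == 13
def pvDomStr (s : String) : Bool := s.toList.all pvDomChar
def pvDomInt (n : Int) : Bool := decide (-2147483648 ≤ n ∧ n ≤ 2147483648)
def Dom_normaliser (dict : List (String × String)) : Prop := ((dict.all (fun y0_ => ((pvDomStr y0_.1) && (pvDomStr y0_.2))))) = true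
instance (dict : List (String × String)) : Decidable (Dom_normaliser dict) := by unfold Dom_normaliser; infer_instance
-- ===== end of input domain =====

-- B builds no nested-list grids: it derives each of the eight recorded orientations independently
-- from the original pattern string by folding an explicit op-word of pure string rewrites
-- (segment reversal / column read-off), instead of A's single in-place flip/transpose walk
-- (objective: alternative).


-- ===== PORT A =====
-- to_str(grid) = "/".join("".join(row) for row in grid); exact: joining rows (char lists) with '/'
def toStr (g : List (List Char)) : String := String.ofList (PySem.Chars.join ['/'] g)

-- zip(*g): hand port of Python's zip over the unpacked rows — row j of the result is column j of g,
-- for j below the length of the SHORTEST row (zip truncates); exact (getD never hits its default).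
def zipStar (g : List (List Char)) : List (List Char) :=
  (List.range (((g.map List.length).min?).getD 0)).map (fun j => g.map (fun row => row.getD j ' '))

-- body of A's outer loop (one pattern)
def stepA (normalise : PySem.Dict String String) (kv : String × String) : PySem.Dict String String :=
  let pattern := kv.1
  let grid := PySem.Chars.splitOn pattern.toList ['/']     -- list(map(list, pattern.split("/")))
  ((List.range 4).foldl (fun (st : List (List Char) × PySem.Dict String String) _ =>
      let grid := st.1.map List.reverse                    -- for row in grid: row.reverse()
      let normalise := st.2.insert (toStr grid) pattern
      let grid := zipStar grid                             -- grid = list(map(list, zip(*grid)))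
      (grid, normalise.insert (toStr grid) pattern))
    (grid, normalise)).2

def normaliser (dict : List (String × String)) : List (String × String) :=
  (dict.foldl stepA PySem.Dict.empty).items

-- ===== PORT B =====
-- "/".join(seg[::-1] for seg in s.split("/"))
def mirrorStr (s : List Char) : List Char :=
  PySem.Chars.join ['/'] ((PySem.Chars.splitOn s ['/']).map List.reverse)

-- "/".join(map("".join, zip(*s.split("/")))): hand port of zip over the unpacked rows, as for A's
-- zipStar — row j of the result is column j, for j below the shortest row length (zip truncates);
-- exact (rows is never empty; getD never hits its default)
def transStr (s : List Char) : List Char :=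
  let rows := PySem.Chars.splitOn s ['/']
  let w := ((rows.map List.length).min?).getD 0
  PySem.Chars.join ['/'] ((List.range w).map (fun j => rows.map (fun r => r.getD j ' ')))

-- body of B's outer loop (one pattern): for k in range(1,9): fold "mtmtmtmt"[:k] over the pattern
def stepB (normalise : PySem.Dict String String) (kv : String × String) : PySem.Dict String String :=
  let pattern := kv.1
  (PySem.List.pyRange 1 9 1).foldl (fun d k =>
      let word := PySem.List.slice "mtmtmtmt".toList none (some k)
      let s := word.foldl (fun s op => if op == 'm' then mirrorStr s else transStr s) pattern.toList
      d.insert (String.ofList s) pattern) normalise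

def normaliser_alt (dict : List (String × String)) : List (String × String) :=
  (dict.foldl stepB PySem.Dict.empty).items

-- ===== PRECONDITION & SPEC =====
def Spec_normaliser (dict : List (String × String)) (out : List (String × String)) : Prop := out = normaliser_alt dict
instance (dict : List (String × String)) (out : List (String × String)) : Decidable (Spec_normaliser dict out) := by unfold Spec_normaliser; infer_instance

-- ===== CLAIM (what is proved, stated in full; the proofs are below) =====
def Claim_equal_normaliser : Prop := ∀ (dict : List (String × String)), Dom_normaliser dict → Spec_normaliser dict (normaliser dict)

-- ===== LEMMAS AND PROOFS =====

-- a simple structural model of s.split("/") (single-character separator)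
def split1 : List Char → List (List Char)
  | [] => [[]]
  | c :: rest =>
    if c = '/' then [] :: split1 rest
    else
      match split1 rest with
      | [] => [[c]]
      | h :: t => (c :: h) :: t

def headMap (f : List Char → List Char) : List (List Char) → List (List Char)
  | [] => []
  | h :: t => f h :: t

theorem split1_ne_nil (s : List Char) : split1 s ≠ [] := by
  induction s with
  | nil => simp [split1]
  | cons c rest ih =>
    simp only [split1]
    split_ifs
    · simp
    · cases h : split1 rest <;> simp

theorem go1 (fuel : Nat) : ∀ (l cur : List Char) (acc : List (List Char)), l.length < fuel →
    PySem.Chars.splitOn.go ['/'] fuel l cur acc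
      = acc.reverse ++ headMap (fun r => cur.reverse ++ r) (split1 l) := by
  induction fuel with
  | zero => intro l cur acc h; omega
  | succ fuel ih =>
    intro l cur acc h
    cases l with
    | nil => simp [PySem.Chars.splitOn.go, split1, headMap]
    | cons c rest =>
      by_cases hc : c = '/'
      · subst hc
        have : PySem.Chars.splitOn.go ['/'] (fuel+1) ('/' :: rest) cur acc
            = PySem.Chars.splitOn.go ['/'] fuel rest [] (cur.reverse :: acc) := by
          simp [PySem.Chars.splitOn.go, List.isPrefixOf]
        rw [this, ih rest [] (cur.reverse :: acc) (by simpa using Nat.lt_of_succ_lt_succ h)]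
        simp only [split1, headMap, List.reverse_cons, List.append_assoc,
          List.cons_append, List.nil_append]
        cases split1 rest <;> simp
      · have : PySem.Chars.splitOn.go ['/'] (fuel+1) (c :: rest) cur acc
            = PySem.Chars.splitOn.go ['/'] fuel rest (c :: cur) acc := by
          simp only [PySem.Chars.splitOn.go, List.isPrefixOf]
          split_ifs with hif
          · simp at hif; exact absurd hif.symm hc
          · rfl
        rw [this, ih rest (c :: cur) acc (by simpa using Nat.lt_of_succ_lt_succ h)]
        obtain ⟨h', t, he⟩ : ∃ h' t, split1 rest = h' :: t := by
          cases hh : split1 rest with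
          | nil => exact absurd hh (split1_ne_nil rest)
          | cons a b => exact ⟨a, b, rfl⟩
        simp [split1, hc, he, headMap]

theorem splitOn_eq (s : List Char) : PySem.Chars.splitOn s ['/'] = split1 s := by
  unfold PySem.Chars.splitOn
  rw [go1 (s.length + 1) s [] [] (by omega)]
  simp only [List.reverse_nil, List.nil_append]
  cases split1 s <;> simp [headMap]

theorem join_split1 (s : List Char) : PySem.Chars.join ['/'] (split1 s) = s := by
  induction s with
  | nil => simp [split1, PySem.Chars.join_singleton]
  | cons c rest ih =>
    obtain ⟨h, t, he⟩ : ∃ h t, split1 rest = h :: t := by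
      cases hh : split1 rest with
      | nil => exact absurd hh (split1_ne_nil rest)
      | cons a b => exact ⟨a, b, rfl⟩
    by_cases hc : c = '/'
    · subst hc
      rw [show split1 ('/' :: rest) = [] :: split1 rest by simp [split1], he,
        PySem.Chars.join_cons_cons]
      rw [he] at ih; simpa using ih
    · rw [show split1 (c :: rest) = (c :: h) :: t by simp [split1, hc, he]]
      rw [he] at ih
      cases t with
      | nil => simpa [PySem.Chars.join_singleton] using ih
      | cons q u =>
        rw [PySem.Chars.join_cons_cons] at ih ⊢
        simpa using ih

-- slash-freeness of the rows of a grid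
def SF (g : List (List Char)) : Prop := ∀ r ∈ g, '/' ∉ r

theorem split1_SF (s : List Char) : SF (split1 s) := by
  induction s with
  | nil => intro r hr; simp [split1] at hr; simp [hr]
  | cons c rest ih =>
    intro r hr
    by_cases hc : c = '/'
    · subst hc
      rw [show split1 ('/' :: rest) = [] :: split1 rest by simp [split1]] at hr
      rcases List.mem_cons.mp hr with rfl | hr
      · simp
      · exact ih r hr
    · obtain ⟨h, t, he⟩ : ∃ h t, split1 rest = h :: t := by
        cases hh : split1 rest with
        | nil => exact absurd hh (split1_ne_nil rest)
        | cons a b => exact ⟨a, b, rfl⟩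
      rw [show split1 (c :: rest) = (c :: h) :: t by simp [split1, hc, he]] at hr
      rcases List.mem_cons.mp hr with rfl | hr
      · intro hm
        rcases List.mem_cons.mp hm with h1 | h1
        · exact hc h1.symm
        · exact ih h (by simp [he]) h1
      · exact ih r (by simp [he, hr])

theorem split1_noslash (r : List Char) (h : '/' ∉ r) : split1 r = [r] := by
  induction r with
  | nil => simp [split1]
  | cons c rest ih =>
    have hc : c ≠ '/' := fun hh => h (by simp [hh])
    have hr : '/' ∉ rest := fun hh => h (by simp [hh])
    simp [split1, hc, ih hr]

theorem split1_row_append (r rest : List Char) (h : '/' ∉ r) :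
    split1 (r ++ '/' :: rest) = r :: split1 rest := by
  induction r with
  | nil => simp [split1]
  | cons c rr ih =>
    have hc : c ≠ '/' := fun hh => h (by simp [hh])
    have hr : '/' ∉ rr := fun hh => h (by simp [hh])
    simp [split1, hc, ih hr]

theorem roundtrip (g : List (List Char)) (hg : SF g) (hne : g ≠ []) :
    split1 (PySem.Chars.join ['/'] g) = g := by
  induction g with
  | nil => exact absurd rfl hne
  | cons r g' ih =>
    cases g' with
    | nil => simpa [PySem.Chars.join_singleton] using split1_noslash r (hg r (by simp))
    | cons q u =>
      rw [PySem.Chars.join_cons_cons]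
      rw [show r ++ ['/'] ++ PySem.Chars.join ['/'] (q :: u)
          = r ++ '/' :: PySem.Chars.join ['/'] (q :: u) by simp]
      rw [split1_row_append _ _ (hg r (by simp))]
      rw [ih (fun x hx => hg x (by simp [hx])) (by simp)]

theorem SF_mirror (g : List (List Char)) (hg : SF g) : SF (g.map List.reverse) := by
  intro r hr
  obtain ⟨x, hx, rfl⟩ := List.mem_map.mp hr
  intro hm
  exact hg x hx (List.mem_reverse.mp hm)

theorem SF_zipStar (g : List (List Char)) (hg : SF g) : SF (zipStar g) := by
  intro r hr
  unfold zipStar at hr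
  obtain ⟨j, _, rfl⟩ := List.mem_map.mp hr
  intro hm
  obtain ⟨row, hrow, he⟩ := List.mem_map.mp hm
  rcases Nat.lt_or_ge j row.length with hj | hj
  · exact hg row hrow (by rw [← he, List.getD_eq_getElem _ _ hj]; exact List.getElem_mem hj)
  · rw [List.getD_eq_default _ _ hj] at he
    exact absurd he (by decide)

-- the two string rewrites of B compute A's grid transforms, through to_str
theorem mirror_comm (g : List (List Char)) (hg : SF g) :
    mirrorStr (PySem.Chars.join ['/'] g) = PySem.Chars.join ['/'] (g.map List.reverse) := by
  cases g with
  | nil => decide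
  | cons r g' =>
    unfold mirrorStr
    rw [splitOn_eq, roundtrip _ hg (by simp)]

theorem trans_comm (g : List (List Char)) (hg : SF g) :
    transStr (PySem.Chars.join ['/'] g) = PySem.Chars.join ['/'] (zipStar g) := by
  cases g with
  | nil => decide
  | cons r g' =>
    unfold transStr
    rw [splitOn_eq, roundtrip _ hg (by simp)]
    rfl

-- per pattern, the eight inserted (key, value) pairs coincide
theorem step_eq (d : PySem.Dict String String) (kv : String × String) :
    stepA d kv = stepB d kv := by
  have hrange : PySem.List.pyRange 1 9 1 = [1,2,3,4,5,6,7,8] := by decide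
  have hw1 : PySem.List.slice "mtmtmtmt".toList none (some 1) = ['m'] := by decide
  have hw2 : PySem.List.slice "mtmtmtmt".toList none (some 2) = ['m','t'] := by decide
  have hw3 : PySem.List.slice "mtmtmtmt".toList none (some 3) = ['m','t','m'] := by decide
  have hw4 : PySem.List.slice "mtmtmtmt".toList none (some 4) = ['m','t','m','t'] := by decide
  have hw5 : PySem.List.slice "mtmtmtmt".toList none (some 5) = ['m','t','m','t','m'] := by decide
  have hw6 : PySem.List.slice "mtmtmtmt".toList none (some 6) = ['m','t','m','t','m','t'] := by decide
  have hw7 : PySem.List.slice "mtmtmtmt".toList none (some 7) = ['m','t','m','t','m','t','m'] := by decide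
  have hw8 : PySem.List.slice "mtmtmtmt".toList none (some 8) = ['m','t','m','t','m','t','m','t'] := by decide
  unfold stepA stepB toStr
  rw [hrange]
  simp only [List.range_succ, List.range_zero, List.foldl_cons, List.foldl_nil,
    List.nil_append, List.cons_append]
  set p := kv.1.toList with hp
  -- the grid chain of A
  set g0 := PySem.Chars.splitOn p ['/'] with hg0
  have hg0' : g0 = split1 p := splitOn_eq p
  have hpj : p = PySem.Chars.join ['/'] g0 := by rw [hg0']; exact (join_split1 p).symm
  have sf0 : SF g0 := by rw [hg0']; exact split1_SF p
  set g1 := g0.map List.reverse with hg1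
  set g2 := zipStar g1 with hg2
  set g3 := g2.map List.reverse with hg3
  set g4 := zipStar g3 with hg4
  set g5 := g4.map List.reverse with hg5
  set g6 := zipStar g5 with hg6
  set g7 := g6.map List.reverse with hg7
  set g8 := zipStar g7 with hg8
  have sf1 : SF g1 := SF_mirror _ sf0
  have sf2 : SF g2 := SF_zipStar _ sf1
  have sf3 : SF g3 := SF_mirror _ sf2
  have sf4 : SF g4 := SF_zipStar _ sf3
  have sf5 : SF g5 := SF_mirror _ sf4
  have sf6 : SF g6 := SF_zipStar _ sf5
  have sf7 : SF g7 := SF_mirror _ sf6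
  have h1 : mirrorStr p = PySem.Chars.join ['/'] g1 := by rw [hpj]; exact mirror_comm _ sf0
  have h2 : transStr (PySem.Chars.join ['/'] g1) = PySem.Chars.join ['/'] g2 := trans_comm _ sf1
  have h3 : mirrorStr (PySem.Chars.join ['/'] g2) = PySem.Chars.join ['/'] g3 := mirror_comm _ sf2
  have h4 : transStr (PySem.Chars.join ['/'] g3) = PySem.Chars.join ['/'] g4 := trans_comm _ sf3
  have h5 : mirrorStr (PySem.Chars.join ['/'] g4) = PySem.Chars.join ['/'] g5 := mirror_comm _ sf4
  have h6 : transStr (PySem.Chars.join ['/'] g5) = PySem.Chars.join ['/'] g6 := trans_comm _ sf5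
  have h7 : mirrorStr (PySem.Chars.join ['/'] g6) = PySem.Chars.join ['/'] g7 := mirror_comm _ sf6
  have h8 : transStr (PySem.Chars.join ['/'] g7) = PySem.Chars.join ['/'] g8 := trans_comm _ sf7
  simp only [hw1, hw2, hw3, hw4, hw5, hw6, hw7, hw8, List.foldl_cons, List.foldl_nil]
  simp only [show (('m':Char) == 'm') = true from by decide,
    show (('t':Char) == 'm') = false from by decide, Bool.false_eq_true, if_true, if_false]
  rw [h1, h2, h3, h4, h5, h6, h7, h8]

-- ===== VERDICT (by name: the statement is the Claim_ definition above) =====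
theorem normaliser_spec : Claim_equal_normaliser := by
  intro dict _
  unfold Spec_normaliser normaliser normaliser_alt
  rw [show stepA = stepB from funext fun d => funext fun kv => step_eq d kv]
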